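-- pv_equiv track=rewrite | github.com/hrithikjoshi98/acto_government_sites | gov_www_superseguros_gob_pa/www_superseguros_gob_pa/www_superseguros_gob_pa/spiders/superseguros.py | remove_specific_punctuation
-- ===== SOURCE A (Python) =====
-- def remove_specific_punctuation(text):
--     punctuation_marks = [
--         ".", ",", "?", "!", ":", "\n", "\t", ";", "—", "-", "'", '"', "(", ")", "[", "]", "{", "}", "…", "\\", "@", "&", "*",
--         "_", "^", "~","`"
--     ]
--     for char in punctuation_marks:
--         text = str(text).replace(char, '')  # Replace each punctuation mark with an empty string
--     return text
-- ===== SOURCE B (Python) =====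
-- _MARKS = frozenset(".,?!:\n\t;\u2014-'\"()[]{}\u2026\\@&*_^~`")
--
-- def remove_specific_punctuation(text):
--     # single pass: keep characters that are not punctuation marks
--     return ''.join(c for c in str(text) if c not in _MARKS)
-- ===== Notes on version B (the rewrite author's own statement) =====
-- stated objective: idiomatic
-- what changed: B builds a frozenset of the punctuation characters once and removes them in a single character-by-character membership-filter pass over str(text), instead of A's 27 full-string str.replace passes.
import Mathlib
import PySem

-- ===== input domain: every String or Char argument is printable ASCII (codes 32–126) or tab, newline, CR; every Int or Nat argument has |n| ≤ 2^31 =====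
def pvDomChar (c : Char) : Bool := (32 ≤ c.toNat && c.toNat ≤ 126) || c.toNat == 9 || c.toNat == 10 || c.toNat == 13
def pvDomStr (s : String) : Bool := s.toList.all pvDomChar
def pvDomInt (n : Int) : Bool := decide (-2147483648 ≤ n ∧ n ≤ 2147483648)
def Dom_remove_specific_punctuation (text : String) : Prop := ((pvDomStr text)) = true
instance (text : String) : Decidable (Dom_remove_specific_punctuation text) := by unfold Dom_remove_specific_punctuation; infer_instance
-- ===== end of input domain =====

-- B removes the punctuation marks in a single membership-filter pass over the characters instead of A's 27 str.replace passes (idiomatic single-pass rewrite).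


-- ===== PORT A =====
-- A's list of punctuation marks (each a one-character string)
def pvMarksA : List String :=
  [".", ",", "?", "!", ":", "\n", "\t", ";", "—", "-", "'", "\"", "(", ")", "[", "]",
   "{", "}", "…", "\\", "@", "&", "*", "_", "^", "~", "`"]

def remove_specific_punctuation (text : String) : String :=
  pvMarksA.foldl (fun t ch => PySem.Str.replace t ch "") text

-- ===== PORT B =====
-- B's frozenset of punctuation characters
def pvMarkSet : List Char :=
  ['.', ',', '?', '!', ':', '\n', '\t', ';', '—', '-', '\'', '"', '(', ')', '[', ']',
   '{', '}', '…', '\\', '@', '&', '*', '_', '^', '~', '`']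

def remove_specific_punctuation_alt (text : String) : String :=
  String.ofList (text.toList.filter (fun c => !(pvMarkSet.contains c)))

-- ===== PRECONDITION & SPEC =====
def Spec_remove_specific_punctuation (text : String) (out : String) : Prop := out = remove_specific_punctuation_alt text
instance (text : String) (out : String) : Decidable (Spec_remove_specific_punctuation text out) := by unfold Spec_remove_specific_punctuation; infer_instance

-- ===== CLAIM (what is proved, stated in full; the proofs are below) =====
def Claim_equal_remove_specific_punctuation : Prop := ∀ (text : String), Dom_remove_specific_punctuation text → Spec_remove_specific_punctuation text (remove_specific_punctuation text)

-- ===== LEMMAS AND PROOFS =====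

-- replace.go on a one-character pattern with empty replacement is a filter
lemma go_single (c : Char) : ∀ (fuel : Nat) (l acc : List Char), l.length ≤ fuel →
    PySem.Chars.replace.go [c] [] fuel l acc = acc.reverse ++ l.filter (· ≠ c) := by
  intro fuel
  induction fuel with
  | zero =>
    intro l acc h
    have : l = [] := List.length_eq_zero_iff.mp (Nat.le_zero.mp h)
    subst this
    simp [PySem.Chars.replace.go]
  | succ n ih =>
    intro l acc h
    cases l with
    | nil => simp [PySem.Chars.replace.go]
    | cons x t =>
      simp only [PySem.Chars.replace.go]
      by_cases hx : x = c
      · subst hx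
        have hp : List.isPrefixOf [x] (x :: t) = true := by simp [List.isPrefixOf]
        rw [if_pos hp]
        simp only [List.length, List.drop, List.reverse_nil, List.nil_append]
        rw [ih t acc (by simpa using Nat.le_of_succ_le_succ h)]
        simp
      · have hp : List.isPrefixOf [c] (x :: t) = false := by
          simp [List.isPrefixOf]; exact fun hxc => (hx hxc.symm).elim
        rw [if_neg (by simp [hp])]
        rw [ih t (x :: acc) (by simpa using Nat.le_of_succ_le_succ h)]
        simp [hx]

lemma replace_single (l : List Char) (c : Char) :
    PySem.Chars.replace l [c] [] = l.filter (· ≠ c) := by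
  simp only [PySem.Chars.replace, List.isEmpty]
  rw [if_neg (by simp)]
  simpa using go_single c l.length l [] le_rfl

lemma A_as_char_fold (ms : List Char) : ∀ (t : String),
    (ms.map (fun c => String.ofList [c])).foldl (fun s m => PySem.Str.replace s m "") t
      = String.ofList (t.toList.filter (fun x => !(ms.contains x))) := by
  induction ms with
  | nil => intro t; simp
  | cons c cs ih =>
    intro t
    simp only [List.map_cons, List.foldl_cons]
    have h1 : PySem.Str.replace t (String.ofList [c]) "" = String.ofList (t.toList.filter (· ≠ c)) := by
      simp [PySem.Str.replace, replace_single]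
    rw [h1, ih]
    simp only [String.toList_ofList, List.filter_filter]
    congr 1
    apply List.filter_congr
    intro x _
    by_cases hx : x = c <;> simp [hx]

lemma marks_eq : pvMarksA = pvMarkSet.map (fun c => String.ofList [c]) := by decide

-- ===== VERDICT (by name: the statement is the Claim_ definition above) =====
theorem remove_specific_punctuation_spec : Claim_equal_remove_specific_punctuation := by
  intro text _
  unfold Spec_remove_specific_punctuation remove_specific_punctuation remove_specific_punctuation_alt
  rw [marks_eq, A_as_char_fold]
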